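-- pv_equiv track=rewrite | github.com/stevillis/TestDevPythonBackendJunior | questao3.py | replace_equal_character
-- ===== SOURCE A (Python) =====
-- def replace_equal_character(string):
--     char_dict = dict()
--     for char in string:
--         if char not in char_dict:
--             char_dict[char] = 1
--         else:
--             if char_dict[char] < 9:
--                 char_dict[char] += 1
--             else:
--                 new_key = char + str(char_dict[char])
--                 if char_dict.get(new_key):
--                     char_dict[new_key] += 1
--                 else:
--                     char_dict[new_key] = 1
--
--     result_string = ""
--     for character, count in char_dict.items():
--         if len(character) == 2:
--             character = character[0]
--         result_string += str(count) + str(character)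
--
--     return result_string
-- ===== SOURCE B (Python) =====
-- def replace_equal_character(string):
--     # Pass 1: full occurrence count per character.
--     totals = {}
--     for ch in string:
--         totals[ch] = totals.get(ch, 0) + 1
--     # Pass 2: emit segments at the 1st and 10th occurrence of each character.
--     seen = {}
--     parts = []
--     for ch in string:
--         k = seen.get(ch, 0) + 1
--         seen[ch] = k
--         if k == 1:
--             parts.append(str(min(totals[ch], 9)) + ch)
--         elif k == 10:
--             parts.append(str(totals[ch] - 9) + ch)
--     return "".join(parts)
-- ===== Notes on version B (the rewrite author's own statement) =====
-- stated objective: alternative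
-- what changed: Replaces the dict with quirky composite overflow keys ('c'+'9') and the items()-emission loop by a precomputed per-character total table plus a single emitting scan that appends the segment at each character's 1st and 10th occurrence, joined at the end.
import Mathlib
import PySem

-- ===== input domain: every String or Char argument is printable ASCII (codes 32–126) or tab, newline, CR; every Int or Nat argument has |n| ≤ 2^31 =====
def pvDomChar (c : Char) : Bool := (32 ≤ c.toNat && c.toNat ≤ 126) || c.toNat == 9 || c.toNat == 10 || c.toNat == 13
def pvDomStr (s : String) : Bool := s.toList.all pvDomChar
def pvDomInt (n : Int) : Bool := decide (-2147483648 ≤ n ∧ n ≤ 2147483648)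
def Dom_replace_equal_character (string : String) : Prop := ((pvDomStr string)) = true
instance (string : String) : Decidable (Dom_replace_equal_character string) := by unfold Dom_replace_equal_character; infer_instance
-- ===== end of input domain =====

-- B replaces A's composite-overflow-key dict and items() emission by a precomputed
-- total-count table plus one emitting scan (segments at the 1st and 10th occurrence).

-- ===== PORT A =====
-- Python str values handled inside the function are represented as List Char (dict keys
-- are built by concatenation: char + str(count)); the final str is rebuilt at the end.
def pvAStep (d : PySem.Dict (List Char) Int) (ch : Char) : PySem.Dict (List Char) Int :=
  if d.contains [ch] = false then
    d.insert [ch] 1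
  else if d.getD [ch] 0 < 9 then
    -- char_dict[char] += 1  (read, add one, setitem)
    d.insert [ch] (d.getD [ch] 0 + 1)
  else
    let new_key := [ch] ++ PySem.Int.toChars (d.getD [ch] 0)
    -- if char_dict.get(new_key):  (truthy = present and non-zero)
    match d.get? new_key with
    | some w => if w ≠ 0 then d.insert new_key (w + 1) else d.insert new_key 1
    | none => d.insert new_key 1

def pvAEmit (acc : List Char) (p : List Char × Int) : List Char :=
  let character := if p.1.length = 2 then p.1.take 1 else p.1
  acc ++ PySem.Int.toChars p.2 ++ character

def replace_equal_character (string : String) : String :=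
  let d := string.toList.foldl pvAStep PySem.Dict.empty
  String.ofList (d.items.foldl pvAEmit [])

-- ===== PORT B =====
def pvBStep (totals : PySem.Dict Char Int)
    (st : PySem.Dict Char Int × List (List Char)) (ch : Char) :
    PySem.Dict Char Int × List (List Char) :=
  let k := st.1.getD ch 0 + 1
  let seen := st.1.insert ch k
  if k = 1 then (seen, st.2 ++ [PySem.Int.toChars (min (totals.getD ch 0) 9) ++ [ch]])
  else if k = 10 then (seen, st.2 ++ [PySem.Int.toChars (totals.getD ch 0 - 9) ++ [ch]])
  else (seen, st.2)

def replace_equal_character_alt (string : String) : String :=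
  let cs := string.toList
  let totals := cs.foldl (fun d x => d.insert x (d.getD x 0 + 1)) PySem.Dict.empty
  let st := cs.foldl (pvBStep totals) (PySem.Dict.empty, [])
  String.ofList st.2.flatten

-- ===== PRECONDITION & SPEC =====
def Spec_replace_equal_character (string : String) (out : String) : Prop := out = replace_equal_character_alt string
instance (string : String) (out : String) : Decidable (Spec_replace_equal_character string out) := by unfold Spec_replace_equal_character; infer_instance

-- ===== CLAIM (what is proved, stated in full; the proofs are below) =====
def Claim_equal_replace_equal_character : Prop := ∀ (string : String), Dom_replace_equal_character string → Spec_replace_equal_character string (replace_equal_character string)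

-- ===== LEMMAS AND PROOFS =====

-- The emission schedule both loops follow: a (char, isOverflow) pair at each character's
-- first (isOverflow = false) and tenth (isOverflow = true) occurrence, given prior counts f.
def pvEmitK : List Char → (Char → Int) → List (Char × Bool)
  | [], _ => []
  | c :: rest, f =>
    (if f c = 0 then [(c, false)] else if f c = 9 then [(c, true)] else []) ++
      pvEmitK rest (fun x => if x = c then f x + 1 else f x)

-- A's dict entry for an emission key, under current counts f.
def pvKey (p : Char × Bool) : List Char := if p.2 then [p.1, '9'] else [p.1]

def pvVal (f : Char → Int) (p : Char × Bool) : Int :=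
  if p.2 then f p.1 - 9 else min (f p.1) 9

def pvEntry (f : Char → Int) (p : Char × Bool) : List Char × Int := (pvKey p, pvVal f p)

def pvMdl (f : Char → Int) (K : List (Char × Bool)) : List (List Char × Int) :=
  K.map (pvEntry f)

-- B's segment for an emission key.
def pvBEntry (totals : PySem.Dict Char Int) (p : Char × Bool) : List Char :=
  if p.2 then PySem.Int.toChars (totals.getD p.1 0 - 9) ++ [p.1]
  else PySem.Int.toChars (min (totals.getD p.1 0) 9) ++ [p.1]

-- A's per-item emission as a function of the item.
def pvEmitOne (p : List Char × Int) : List Char :=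
  PySem.Int.toChars p.2 ++ (if p.1.length = 2 then p.1.take 1 else p.1)

def pvInv (f : Char → Int) (K : List (Char × Bool)) : Prop :=
  (∀ c, ((c, false) ∈ K ↔ 1 ≤ f c) ∧ ((c, true) ∈ K ↔ 10 ≤ f c)) ∧
  (∀ c, 0 ≤ f c) ∧ K.Nodup

lemma pvKey_inj : Function.Injective pvKey := by
  rintro ⟨a, b⟩ ⟨x, y⟩ h
  cases b <;> cases y <;> simp_all [pvKey]

lemma pvKeys_of_items {d : PySem.Dict (List Char) Int} {f : Char → Int} {K : List (Char × Bool)}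
    (hit : d.items = pvMdl f K) : d.keys = K.map pvKey := by
  simp only [PySem.Dict.keys, hit, pvMdl, List.map_map]
  rfl

lemma pvNodup_keys {d : PySem.Dict (List Char) Int} {f : Char → Int} {K : List (Char × Bool)}
    (hit : d.items = pvMdl f K) (hnd : K.Nodup) : d.keys.Nodup := by
  rw [pvKeys_of_items hit]; exact hnd.map pvKey_inj

lemma pvMem_keys_single {d : PySem.Dict (List Char) Int} {f : Char → Int} {K : List (Char × Bool)}
    (hit : d.items = pvMdl f K) (x : Char) : [x] ∈ d.keys ↔ (x, false) ∈ K := by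
  rw [pvKeys_of_items hit, List.mem_map]
  constructor
  · rintro ⟨⟨a, b⟩, hm, hk⟩
    cases b <;> simp_all [pvKey]
  · intro hm; exact ⟨(x, false), hm, rfl⟩

lemma pvMem_keys_over {d : PySem.Dict (List Char) Int} {f : Char → Int} {K : List (Char × Bool)}
    (hit : d.items = pvMdl f K) (x : Char) : [x, '9'] ∈ d.keys ↔ (x, true) ∈ K := by
  rw [pvKeys_of_items hit, List.mem_map]
  constructor
  · rintro ⟨⟨a, b⟩, hm, hk⟩
    cases b <;> simp_all [pvKey]
  · intro hm; exact ⟨(x, true), hm, rfl⟩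

lemma pvGetD_single {d : PySem.Dict (List Char) Int} {f : Char → Int} {K : List (Char × Bool)}
    (hit : d.items = pvMdl f K) (hnd : K.Nodup) {x : Char} (hm : (x, false) ∈ K) :
    d.getD [x] 0 = min (f x) 9 := by
  have : ([x], min (f x) 9) ∈ d.items := by
    rw [hit, pvMdl]
    exact List.mem_map.mpr ⟨(x, false), hm, rfl⟩
  exact PySem.Dict.getD_of_mem_items d this (pvNodup_keys hit hnd) 0

lemma pvGet?_over {d : PySem.Dict (List Char) Int} {f : Char → Int} {K : List (Char × Bool)}
    (hit : d.items = pvMdl f K) (hnd : K.Nodup) {x : Char} (hm : (x, true) ∈ K) :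
    d.get? [x, '9'] = some (f x - 9) := by
  have : ([x, '9'], f x - 9) ∈ d.items := by
    rw [hit, pvMdl]
    exact List.mem_map.mpr ⟨(x, true), hm, rfl⟩
  exact PySem.Dict.get?_of_mem_items d this (pvNodup_keys hit hnd)

lemma pvEntry_of_ne {f : Char → Int} {c : Char} (p : Char × Bool) (hpc : p.1 ≠ c) :
    pvEntry (fun x => if x = c then f x + 1 else f x) p = pvEntry f p := by
  simp [pvEntry, pvVal, hpc]

lemma pvA_loop (cs : List Char) : ∀ (f : Char → Int) (K : List (Char × Bool))
    (d : PySem.Dict (List Char) Int),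
    d.items = pvMdl f K → pvInv f K →
    (cs.foldl pvAStep d).items = pvMdl (fun x => f x + cs.count x) (K ++ pvEmitK cs f) := by
  induction cs with
  | nil =>
    intro f K d hit _
    simpa [pvEmitK] using hit
  | cons c rest ih =>
    intro f K d hit hinv
    obtain ⟨hmem, hpos, hnd⟩ := hinv
    set f' : Char → Int := fun x => if x = c then f x + 1 else f x with hf'
    set E : List (Char × Bool) :=
      if f c = 0 then [(c, false)] else if f c = 9 then [(c, true)] else [] with hE
    -- the one step
    have hstep : (pvAStep d c).items = pvMdl f' (K ++ E) := by
      have hndk := pvNodup_keys hit hnd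
      by_cases hc0 : f c = 0
      · -- first occurrence: insert the fresh single-char key with value 1
        have hnotK : (c, false) ∉ K := fun hm => by have := (hmem c).1.mp hm; omega
        have hcont : d.contains [c] = false := by
          rw [PySem.Dict.contains_eq_decide_mem_keys]
          simp [pvMem_keys_single hit c, hnotK]
        have hpc : ∀ p ∈ K, p.1 ≠ c := by
          rintro ⟨a, b⟩ hm hpe
          simp only at hpe
          subst hpe
          cases b
          · exact hnotK hm
          · have := (hmem a).2.mp hm; omega
        rw [pvAStep, if_pos hcont, PySem.Dict.items_insert_of_not_contains d _ hcont, hit]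
        rw [hE, if_pos hc0]
        simp only [pvMdl, List.map_append, List.map_cons, List.map_nil]
        congr 1
        · exact (List.map_congr_left fun p hp => (pvEntry_of_ne p (hpc p hp)).symm)
        · simp only [pvEntry, pvKey, pvVal, hf', if_pos rfl, if_neg Bool.false_ne_true, hc0]
          norm_num
      · have hKc : (c, false) ∈ K := (hmem c).1.mpr (by have := hpos c; omega)
        have hcont : d.contains [c] = true := by
          rw [PySem.Dict.contains_eq_decide_mem_keys]
          simp [pvMem_keys_single hit c, hKc]
        have hcont' : ¬ d.contains [c] = false := by simp [hcont]
        by_cases hlt : f c < 9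
        · -- ordinary increment of the single-char key
          have hgetD : d.getD [c] 0 = f c := by
            rw [pvGetD_single hit hnd hKc]; omega
          rw [pvAStep, if_neg hcont', hgetD, if_pos hlt,
            PySem.Dict.items_insert_of_contains d _ hcont, hit]
          rw [hE, if_neg hc0, if_neg (by omega : ¬ f c = 9)]
          simp only [pvMdl, List.append_nil, List.map_map]
          apply List.map_congr_left
          rintro ⟨a, b⟩ hp
          by_cases hac : a = c
          · subst hac
            cases b
            · simp only [Function.comp, pvEntry, pvKey, pvVal, hf']
              simp only [if_neg Bool.false_ne_true]
              have h2 : min (f a + 1) 9 = f a + 1 := by omega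
              simp [h2]
            · have := (hmem a).2.mp hp; omega
          · have hkey : pvKey (a, b) ≠ [c] := by
              cases b <;> simp [pvKey, hac]
            simp only [Function.comp, pvEntry]
            rw [if_neg (by simpa using hkey)]
            rw [show pvVal f' (a, b) = pvVal f (a, b) from by simp [pvVal, hf', hac]]
        · -- the single-char key is saturated at 9: the overflow key [c, '9']
          have hgetD : d.getD [c] 0 = 9 := by
            rw [pvGetD_single hit hnd hKc]; omega
          have hnk : [c] ++ PySem.Int.toChars (9 : Int) = [c, '9'] := by
            rw [show PySem.Int.toChars (9 : Int) = ['9'] from by decide]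
            rfl
          by_cases hc9 : f c = 9
          · -- tenth occurrence: fresh overflow key, value 1
            have hnotT : (c, true) ∉ K := fun hm => by have := (hmem c).2.mp hm; omega
            have hget9 : d.get? [c, '9'] = none := by
              rw [PySem.Dict.get?_eq_none_iff_not_mem_keys]
              simp [pvMem_keys_over hit c, hnotT]
            have hcont9 : d.contains [c, '9'] = false := by
              rw [PySem.Dict.contains_eq_decide_mem_keys]
              simp [pvMem_keys_over hit c, hnotT]
            rw [pvAStep, if_neg hcont', hgetD, if_neg (by omega : ¬ (9:Int) < 9)]
            simp only [hnk, hget9]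
            rw [PySem.Dict.items_insert_of_not_contains d _ hcont9, hit]
            rw [hE, if_neg hc0, if_pos hc9]
            simp only [pvMdl, List.map_append, List.map_cons, List.map_nil]
            congr 1
            · apply List.map_congr_left
              rintro ⟨a, b⟩ hp
              by_cases hac : a = c
              · subst hac
                cases b
                · simp only [pvEntry, pvKey, pvVal, hf']
                  simp only [if_neg Bool.false_ne_true]
                  rw [hc9]
                  norm_num
                · exact absurd hp hnotT
              · exact (pvEntry_of_ne (a, b) hac).symm
            · simp only [pvEntry, pvKey, pvVal, hf', if_pos rfl, hc9]
              norm_num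
          · -- beyond the tenth occurrence: increment the overflow key
            have hKt : (c, true) ∈ K := (hmem c).2.mpr (by omega)
            have hget9 : d.get? [c, '9'] = some (f c - 9) := pvGet?_over hit hnd hKt
            have hcont9 : d.contains [c, '9'] = true := by
              rw [PySem.Dict.contains_eq_decide_mem_keys]
              simp [pvMem_keys_over hit c, hKt]
            rw [pvAStep, if_neg hcont', hgetD, if_neg (by omega : ¬ (9:Int) < 9)]
            simp only [hnk, hget9]
            rw [if_pos (by omega : f c - 9 ≠ 0)]
            rw [PySem.Dict.items_insert_of_contains d _ hcont9, hit]
            rw [hE, if_neg hc0, if_neg hc9]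
            simp only [pvMdl, List.append_nil, List.map_map]
            apply List.map_congr_left
            rintro ⟨a, b⟩ hp
            by_cases hac : a = c
            · subst hac
              cases b
              · have hkey : pvKey (a, false) ≠ [a, '9'] := by simp [pvKey]
                simp only [Function.comp, pvEntry]
                rw [if_neg (by simpa using hkey)]
                rw [show pvVal f' (a, false) = pvVal f (a, false) from by
                  simp only [pvVal, hf', if_neg Bool.false_ne_true, if_pos rfl]
                  omega]
              · simp only [Function.comp, pvEntry, pvKey, pvVal, hf']
                norm_num
                ring
            · have hkey : pvKey (a, b) ≠ [c, '9'] := by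
                cases b <;> simp [pvKey, hac]
              simp only [Function.comp, pvEntry]
              rw [if_neg (by simpa using hkey)]
              rw [show pvVal f' (a, b) = pvVal f (a, b) from by simp [pvVal, hf', hac]]
    -- the invariant is preserved
    have hmem' : ∀ x, ((x, false) ∈ K ++ E ↔ 1 ≤ f' x) ∧ ((x, true) ∈ K ++ E ↔ 10 ≤ f' x) := by
      intro x
      by_cases hx : x = c
      · subst hx
        have h1 := (hmem x).1
        have h2 := (hmem x).2
        have h3 := hpos x
        have hfc : f' x = f x + 1 := by simp [hf']
        constructor
        · simp only [List.mem_append, h1, hfc, hE]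
          split_ifs with hc0 hc9 <;> simp <;> omega
        · simp only [List.mem_append, h2, hfc, hE]
          split_ifs with hc0 hc9 <;> simp <;> omega
      · have hfx : f' x = f x := by simp [hf', hx]
        have hxE : ∀ b, ¬ (x, b) ∈ E := by
          intro b hb
          simp only [hE] at hb
          split_ifs at hb <;> simp_all
        simp [List.mem_append, hfx, hxE false, hxE true, (hmem x).1, (hmem x).2]
    have hpos' : ∀ x, 0 ≤ f' x := by
      intro x
      have := hpos x
      simp only [hf']
      split_ifs <;> omega
    have hnd' : (K ++ E).Nodup := by
      simp only [hE]
      split_ifs with hc0 hc9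
      · have hni : (c, false) ∉ K := fun hm => by have := (hmem c).1.mp hm; omega
        refine hnd.append (List.nodup_singleton _) ?_
        intro a ha hb
        simp only [List.mem_singleton] at hb
        subst hb
        exact hni ha
      · have hni : (c, true) ∉ K := fun hm => by have := (hmem c).2.mp hm; omega
        refine hnd.append (List.nodup_singleton _) ?_
        intro a ha hb
        simp only [List.mem_singleton] at hb
        subst hb
        exact hni ha
      · simpa using hnd
    rw [List.foldl_cons, ih f' (K ++ E) _ hstep ⟨hmem', hpos', hnd'⟩]
    have hcount' : (fun x => f' x + (rest.count x : Int)) = fun x => f x + ((c :: rest).count x : Int) := by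
      funext x
      by_cases hx : x = c
      · subst hx
        simp only [hf', if_pos rfl, List.count_cons_self]
        push_cast
        ring
      · simp only [hf', if_neg hx]
        rw [List.count_cons_of_ne (fun h => hx h.symm)]
    rw [hcount', List.append_assoc]
    congr 1

lemma pvB_loop (totals : PySem.Dict Char Int) (cs : List Char) :
    ∀ (f : Char → Int) (seen : PySem.Dict Char Int) (parts : List (List Char)),
    (∀ c, seen.getD c 0 = f c) →
    (cs.foldl (pvBStep totals) (seen, parts)).2 = parts ++ (pvEmitK cs f).map (pvBEntry totals) := by
  induction cs with
  | nil => intro f seen parts h; simp [pvEmitK]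
  | cons c rest ih =>
    intro f seen parts h
    rw [List.foldl_cons]
    have hstep : pvBStep totals (seen, parts) c =
        (seen.insert c (f c + 1),
          parts ++ (if f c = 0 then [pvBEntry totals (c, false)]
            else if f c = 9 then [pvBEntry totals (c, true)] else [])) := by
      simp only [pvBStep, h c]
      by_cases h0 : f c = 0
      · simp [h0, pvBEntry]
      · by_cases h9 : f c = 9
        · have h1 : ¬ (f c + 1 = 1) := by omega
          simp [h9, pvBEntry]
        · have h1 : ¬ (f c + 1 = 1) := by omega
          have h10 : ¬ (f c + 1 = 10) := by omega
          simp [h0, h9, h1, h10]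
    rw [hstep, ih (fun x => if x = c then f x + 1 else f x) _ _ ?_]
    · simp only [pvEmitK, List.map_append, List.append_assoc]
      split_ifs <;> simp
    · intro x
      rw [PySem.Dict.getD_insert]
      split_ifs with hx <;> simp [hx, h]

lemma pvEmit_foldl (L : List (List Char × Int)) (acc : List Char) :
    L.foldl pvAEmit acc = acc ++ L.flatMap pvEmitOne := by
  have h : pvAEmit = fun a p => a ++ pvEmitOne p := by
    funext a p; simp [pvAEmit, pvEmitOne]
  rw [h]; exact PySem.List.foldl_append_eq_flatMap pvEmitOne L acc

lemma pvEmitOne_entry (f : Char → Int) (totals : PySem.Dict Char Int)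
    (h : ∀ x, totals.getD x 0 = f x) (p : Char × Bool) :
    pvEmitOne (pvEntry f p) = pvBEntry totals p := by
  rcases p with ⟨a, b⟩
  cases b <;> simp [pvEmitOne, pvEntry, pvBEntry, pvKey, pvVal, h]

-- ===== VERDICT (by name: the statement is the Claim_ definition above) =====
theorem replace_equal_character_spec : Claim_equal_replace_equal_character := by
  intro s _
  unfold Spec_replace_equal_character replace_equal_character replace_equal_character_alt
  set cs := s.toList with hcs
  show String.ofList ((cs.foldl pvAStep PySem.Dict.empty).items.foldl pvAEmit []) =
    String.ofList ((cs.foldl (pvBStep (cs.foldl (fun d x => d.insert x (d.getD x 0 + 1))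
      PySem.Dict.empty)) (PySem.Dict.empty, [])).2.flatten)
  have htot : ∀ x, (cs.foldl (fun d x => d.insert x (d.getD x 0 + 1)) PySem.Dict.empty).getD x 0
      = (fun x => (0 : Int) + cs.count x) x := by
    intro x
    rw [PySem.Dict.getD_foldl_insert_add_one]
    simp
  have hA := pvA_loop cs (fun _ => 0) [] PySem.Dict.empty (by rfl)
    ⟨by simp, by simp, by simp⟩
  have hB := pvB_loop (cs.foldl (fun d x => d.insert x (d.getD x 0 + 1)) PySem.Dict.empty)
    cs (fun _ => 0) PySem.Dict.empty [] (by simp)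
  simp only [List.nil_append] at hA hB
  rw [hA, hB, pvEmit_foldl, pvMdl, List.flatMap_def, List.map_map]
  rw [List.nil_append]
  congr 1
  congr 1
  apply List.map_congr_left
  intro p _
  exact pvEmitOne_entry _ _ (fun x => by simpa using htot x) p
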